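-- pv_equiv track=rewrite | github.com/sapkotakiran/Blind_Auction | main.py | find_highest_bid
-- ===== SOURCE A (Python) =====
-- def find_highest_bid(bidding_dictionary):
--     highest_bid = 0
--     winners = []
--
--     for bidder, bid_amount in bidding_dictionary.items():
--         if bid_amount > highest_bid:
--             highest_bid = bid_amount
--             winners = [bidder]
--         elif bid_amount == highest_bid:
--             winners.append(bidder)
--
--     return highest_bid, winners
-- ===== SOURCE B (Python) =====
-- def find_highest_bid(bidding_dictionary):
--     highest = max([0] + list(bidding_dictionary.values()))
--     winners = [bidder for bidder, bid in bidding_dictionary.items() if bid == highest]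
--     return highest, winners
-- ===== Notes on version B (the rewrite author's own statement) =====
-- stated objective: simpler
-- what changed: Replaces A's fused running-max pass with reset-or-append winner list by a compute-max-once (floored at 0) then filter-winners decomposition.
import Mathlib
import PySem

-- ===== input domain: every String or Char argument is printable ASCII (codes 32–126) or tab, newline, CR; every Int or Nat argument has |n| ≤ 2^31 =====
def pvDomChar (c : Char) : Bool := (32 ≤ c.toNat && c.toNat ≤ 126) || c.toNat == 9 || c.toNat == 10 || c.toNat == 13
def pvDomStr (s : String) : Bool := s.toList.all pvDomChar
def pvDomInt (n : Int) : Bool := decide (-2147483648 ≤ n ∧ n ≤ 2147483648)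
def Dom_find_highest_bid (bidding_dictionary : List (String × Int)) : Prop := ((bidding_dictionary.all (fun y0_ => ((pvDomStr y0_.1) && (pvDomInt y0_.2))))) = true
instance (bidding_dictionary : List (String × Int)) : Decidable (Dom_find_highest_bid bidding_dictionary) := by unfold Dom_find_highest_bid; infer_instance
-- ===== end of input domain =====

-- ===== PORT A =====
-- A-side helper: A's loop body.
def stepA (st : Int × List String) (kv : String × Int) : Int × List String :=
  if kv.2 > st.1 then (kv.2, [kv.1])
  else if kv.2 == st.1 then (st.1, st.2 ++ [kv.1])
  else st

def find_highest_bid (bidding_dictionary : List (String × Int)) : Int × List String :=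
  bidding_dictionary.foldl stepA (0, [])

-- ===== PORT B =====
-- B computes the maximum once (floored at 0) and then filters the winners in a second pass.
def find_highest_bid_alt (bidding_dictionary : List (String × Int)) : Int × List String :=
  let highest := (bidding_dictionary.map Prod.snd).foldl max 0
  (highest, (bidding_dictionary.filter (fun kv => kv.2 == highest)).map Prod.fst)

-- ===== PRECONDITION & SPEC =====
def Spec_find_highest_bid (bidding_dictionary : List (String × Int)) (out : Int × List String) : Prop := out = find_highest_bid_alt bidding_dictionary
instance (bidding_dictionary : List (String × Int)) (out : Int × List String) : Decidable (Spec_find_highest_bid bidding_dictionary out) := by unfold Spec_find_highest_bid; infer_instance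

-- ===== CLAIM (what is proved, stated in full; the proofs are below) =====
def Claim_equal_find_highest_bid : Prop := ∀ (bidding_dictionary : List (String × Int)), Dom_find_highest_bid bidding_dictionary → Spec_find_highest_bid bidding_dictionary (find_highest_bid bidding_dictionary)

-- ===== LEMMAS AND PROOFS =====

-- ===== VERDICT (by name: the statement is the Claim_ definition above) =====
lemma le_foldl_max (l : List Int) (m : Int) : m ≤ l.foldl max m := by
  induction l generalizing m with
  | nil => simp
  | cons x t ih => exact le_trans (le_max_left m x) (ih (max m x))

lemma loop_char (d : List (String × Int)) (m : Int) (w : List String) :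
    d.foldl stepA (m, w)
    = ((d.map Prod.snd).foldl max m,
       (if m = (d.map Prod.snd).foldl max m then w else [])
         ++ (d.filter (fun kv => kv.2 == (d.map Prod.snd).foldl max m)).map Prod.fst) := by
  induction d generalizing m w with
  | nil => simp
  | cons kv t ih =>
    obtain ⟨k, b⟩ := kv
    simp only [List.foldl_cons, List.map_cons, List.filter_cons]
    by_cases h1 : b > m
    · rw [show stepA (m, w) (k, b) = (b, [k]) from by simp [stepA, h1]]
      rw [ih b [k]]
      simp only [max_eq_right (le_of_lt h1)]
      have hmne : ¬ m = (t.map Prod.snd).foldl max b :=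
        by have := le_foldl_max (t.map Prod.snd) b; omega
      rw [if_neg hmne]
      by_cases h2 : b = (t.map Prod.snd).foldl max b
      · simp [← h2]
      · simp [h2]
    · by_cases h2 : b = m
      · subst h2
        rw [show stepA (b, w) (k, b) = (b, w ++ [k]) from by simp [stepA]]
        rw [ih b (w ++ [k])]
        simp only [max_self]
        by_cases h3 : b = (t.map Prod.snd).foldl max b
        · simp [← h3, List.append_assoc]
        · simp [h3]
      · have hlt : b < m := lt_of_le_of_ne (not_lt.mp h1) h2
        rw [show stepA (m, w) (k, b) = (m, w) from by simp [stepA, h2, not_lt.mpr (le_of_lt hlt)]]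
        rw [ih m w]
        simp only [max_eq_left (le_of_lt hlt)]
        have hbne : ¬ b = (t.map Prod.snd).foldl max m :=
          by have := le_foldl_max (t.map Prod.snd) m; omega
        simp [hbne]

theorem find_highest_bid_spec : Claim_equal_find_highest_bid := by
  intro d _
  unfold Spec_find_highest_bid find_highest_bid find_highest_bid_alt
  rw [loop_char]
  simp
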